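-- pv_equiv track=rewrite | github.com/Ren-Xuan/LeetCode | 699-h-fallingSquares.py | fallingSquares1
-- ===== SOURCE A (Python) =====
-- def fallingSquares1(positions):
--     qans = [0] * len(positions)
--     for i, (left, size) in enumerate(positions):
--         right = left + size
--         qans[i] += size
--         for j in range(i+1, len(positions)):
--             left2, size2 = positions[j]
--             right2 = left2 + size2
--             if left2 < right and left < right2: #intersect
--                 qans[j] = max(qans[j], qans[i])
--
--     ans = []
--     for x in qans:
--         ans.append(max(ans[-1], x) if ans else x)
--     return ans
-- ===== SOURCE B (Python) =====
-- def fallingSquares1(positions):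
--     # pull-based: each square's height = its size + max height of earlier intersecting squares,
--     # with the running maximum fused into the same single pass
--     heights = []  # (left, right, height) of every dropped square
--     ans = []
--     best = 0
--     for left, size in positions:
--         right = left + size
--         m = 0
--         for l0, r0, h0 in heights:
--             if l0 < right and left < r0:
--                 m = max(m, h0)
--         h = size + m
--         heights.append((left, right, h))
--         best = h if not ans else max(best, h)
--         ans.append(best)
--     return ans
-- ===== Notes on version B (the rewrite author's own statement) =====
-- stated objective: alternative
-- what changed: A pushes each settled height forward into a shared qans array via an inner scan over all later squares and then takes prefix maxima in a second pass; B pulls each new square's height from a list of already-dropped (left,right,height) intervals and fuses the running maximum into the same single pass, with no index arithmetic and no second pass.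
import Mathlib
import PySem

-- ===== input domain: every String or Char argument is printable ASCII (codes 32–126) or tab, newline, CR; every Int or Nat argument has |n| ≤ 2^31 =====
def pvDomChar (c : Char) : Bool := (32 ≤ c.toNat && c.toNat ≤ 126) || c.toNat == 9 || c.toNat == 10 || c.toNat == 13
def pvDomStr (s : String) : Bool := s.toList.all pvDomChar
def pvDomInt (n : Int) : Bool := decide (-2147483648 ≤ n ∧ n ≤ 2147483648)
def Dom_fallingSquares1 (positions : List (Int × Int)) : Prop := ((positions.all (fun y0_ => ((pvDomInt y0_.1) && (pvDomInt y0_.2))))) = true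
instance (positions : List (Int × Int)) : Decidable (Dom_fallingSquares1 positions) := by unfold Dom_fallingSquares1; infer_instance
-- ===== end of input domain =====

-- B replaces A's forward-push into a shared indexed array (plus a second prefix-max pass) by a
-- single backward-pull pass over a list of dropped intervals with the running maximum fused in.


-- ===== PORT A =====
-- inner loop body: 'for j in range(i+1, len(positions)): … if intersect: qans[j] = max(qans[j], qans[i])'
def aInner (positions : List (Int × Int)) (left right i : Int) (qans : List Int) (j : Int) : List Int :=
  let p2 := PySem.List.pyGetD positions j ((0 : Int), (0 : Int))
  let left2 := p2.1
  let size2 := p2.2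
  let right2 := left2 + size2
  if left2 < right ∧ left < right2 then
    PySem.List.pySetD qans j (max (PySem.List.pyGetD qans j 0) (PySem.List.pyGetD qans i 0))
  else qans

-- outer loop body: 'right = left + size; qans[i] += size; <inner loop>'
def aOuter (positions : List (Int × Int)) (qans : List Int) (ip : Int × (Int × Int)) : List Int :=
  let i := ip.1
  let left := ip.2.1
  let size := ip.2.2
  let right := left + size
  let qans := PySem.List.pySetD qans i (PySem.List.pyGetD qans i 0 + size)
  (PySem.List.pyRange (i + 1) (positions.length : Int) 1).foldl (aInner positions left right i) qans

-- second pass: 'ans.append(max(ans[-1], x) if ans else x)'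
def aPhase2 (ans : List Int) (x : Int) : List Int :=
  if ans.isEmpty then ans ++ [x] else ans ++ [max (PySem.List.pyGetD ans (-1) 0) x]

def fallingSquares1 (positions : List (Int × Int)) : List Int :=
  let qans := List.replicate positions.length (0 : Int)
  let qans := (PySem.List.enumerate positions 0).foldl (aOuter positions) qans
  qans.foldl aPhase2 []

-- ===== PORT B =====
-- 'if l0 < right and left < r0: m = max(m, h0)'
def bMax (left right m : Int) (q : Int × Int × Int) : Int :=
  if q.1 < right ∧ left < q.2.1 then max m q.2.2 else m

-- one iteration of B's single pass over (heights, ans, best)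
def bStep (st : List (Int × Int × Int) × List Int × Int) (p : Int × Int) :
    List (Int × Int × Int) × List Int × Int :=
  let left := p.1
  let size := p.2
  let right := left + size
  let m := st.1.foldl (bMax left right) 0
  let h := size + m
  let best := if st.2.1.isEmpty then h else max st.2.2 h
  (st.1 ++ [(left, right, h)], st.2.1 ++ [best], best)

def fallingSquares1_alt (positions : List (Int × Int)) : List Int :=
  (positions.foldl bStep (([], [], 0) : List (Int × Int × Int) × List Int × Int)).2.1

-- ===== PRECONDITION & SPEC =====
def Spec_fallingSquares1 (positions : List (Int × Int)) (out : List Int) : Prop := out = fallingSquares1_alt positions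
instance (positions : List (Int × Int)) (out : List Int) : Decidable (Spec_fallingSquares1 positions out) := by unfold Spec_fallingSquares1; infer_instance

-- ===== CLAIM (what is proved, stated in full; the proofs are below) =====
def Claim_equal_fallingSquares1 : Prop := ∀ (positions : List (Int × Int)), Dom_fallingSquares1 positions → Spec_fallingSquares1 positions (fallingSquares1 positions)

-- ===== LEMMAS AND PROOFS =====

-- proof-side abstractions
-- height pulled by a new square p from the already-dropped intervals hs
def pend (hs : List (Int × Int × Int)) (p : Int × Int) : Int :=
  hs.foldl (bMax p.1 (p.1 + p.2)) 0

def hstep (hs : List (Int × Int × Int)) (p : Int × Int) : List (Int × Int × Int) :=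
  hs ++ [(p.1, p.1 + p.2, p.2 + pend hs p)]

def hlist (ps : List (Int × Int)) : List (Int × Int × Int) := ps.foldl hstep []

def pm (xs : List Int) : List Int := xs.foldl aPhase2 []

def bF (hs : List (Int × Int × Int)) : List (Int × Int × Int) × List Int × Int :=
  (hs, pm (hs.map (·.2.2)), PySem.List.pyGetD (pm (hs.map (·.2.2))) (-1) 0)

lemma pm_append (xs : List Int) (x : Int) : pm (xs ++ [x]) = aPhase2 (pm xs) x := by
  simp [pm, List.foldl_append]

lemma bStep_bF (hs : List (Int × Int × Int)) (p : Int × Int) :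
    bStep (bF hs) p = bF (hstep hs p) := by
  have hmap : (hstep hs p).map (·.2.2) = hs.map (·.2.2) ++ [p.2 + pend hs p] := by
    simp [hstep]
  have hpend : hs.foldl (bMax p.1 (p.1 + p.2)) 0 = pend hs p := rfl
  have hsing : ∀ (xs : List Int) (x : Int), PySem.List.pyGetD (xs ++ [x]) (-1) 0 = x :=
    fun xs x => PySem.List.pyGetD_neg_one_append_singleton xs x 0
  have hone : ∀ x : Int, PySem.List.pyGetD [x] (-1) 0 = x :=
    fun x => by simpa using hsing [] x
  by_cases hA : pm (hs.map (·.2.2)) = []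
  · simp [bStep, bF, pm_append, aPhase2, hA, hpend, hstep, hone]
  · simp [bStep, bF, pm_append, aPhase2, hA, hpend, hstep, hsing]

lemma foldl_bStep_bF (ps : List (Int × Int)) : ∀ hs,
    ps.foldl bStep (bF hs) = bF (ps.foldl hstep hs) := by
  induction ps with
  | nil => intro hs; rfl
  | cons p ps ih => intro hs; simp only [List.foldl_cons, bStep_bF, ih]

lemma alt_eq (ps : List (Int × Int)) :
    fallingSquares1_alt ps = pm ((hlist ps).map (·.2.2)) := by
  have h0 : (([], [], 0) : List (Int × Int × Int) × List Int × Int) = bF [] := rfl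
  rw [fallingSquares1_alt, h0, foldl_bStep_bF, hlist]
  rfl

lemma length_foldl_hstep (l : List (Int × Int)) : ∀ hs : List (Int × Int × Int),
    (l.foldl hstep hs).length = hs.length + l.length := by
  induction l with
  | nil => simp
  | cons p l ih => intro hs; simp [List.foldl_cons, ih, hstep]; omega

lemma foldl_hstep_prefix (l : List (Int × Int)) : ∀ hs : List (Int × Int × Int),
    ∃ t, l.foldl hstep hs = hs ++ t := by
  induction l with
  | nil => intro hs; exact ⟨[], by simp⟩
  | cons p l ih =>
    intro hs
    obtain ⟨t, ht⟩ := ih (hstep hs p)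
    refine ⟨(p.1, p.1 + p.2, p.2 + pend hs p) :: t, ?_⟩
    rw [List.foldl_cons]
    rw [show hstep hs p = hs ++ [(p.1, p.1 + p.2, p.2 + pend hs p)] from rfl] at ht
    simpa using ht

lemma hlist_take (ps : List (Int × Int)) (k : Nat) (hk : k ≤ ps.length) :
    (hlist ps).take k = hlist (ps.take k) := by
  have hsplit : hlist ps = (ps.drop k).foldl hstep (hlist (ps.take k)) := by
    rw [hlist, hlist, ← List.foldl_append, List.take_append_drop]
  obtain ⟨t, ht⟩ := foldl_hstep_prefix (ps.drop k) (hlist (ps.take k))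
  have hlen : (hlist (ps.take k)).length = k := by
    have := length_foldl_hstep (ps.take k) ([] : List (Int × Int × Int))
    simp only [hlist]
    simp [this, Nat.min_eq_left hk]
  rw [hsplit, ht]
  have h2 : (hlist (ps.take k) ++ t).take (hlist (ps.take k)).length = hlist (ps.take k) :=
    List.take_left
  rwa [hlen] at h2

lemma length_hlist (ps : List (Int × Int)) : (hlist ps).length = ps.length := by
  simpa using length_foldl_hstep ps []

lemma enum_get (ps : List (Int × Int)) : ∀ (s : Int) (k : Nat),
    (PySem.List.enumerate ps s)[k]? = (ps[k]?).map (fun x => (s + (k : Int), x)) := by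
  induction ps with
  | nil => intro s k; simp [PySem.List.enumerate_nil]
  | cons p ps ih =>
    intro s k
    rw [PySem.List.enumerate_cons]
    cases k with
    | zero => simp
    | succ k =>
      simp only [List.getElem?_cons_succ, ih (s + 1) k]
      cases ps[k]? <;> (simp; try ring_nf)

-- general list facts used at an append boundary
lemma set_at_length {α : Type} (l1 : List α) (x v : α) (l2 : List α) :
    (l1 ++ x :: l2).set l1.length v = l1 ++ v :: l2 := by simp

lemma getD_at_length (l1 : List Int) (x : Int) (l2 : List Int) :
    (l1 ++ x :: l2).getD l1.length 0 = x := by simp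

lemma getD_append_lt (l1 l2 : List Int) (k : Nat) (h : k < l1.length) :
    (l1 ++ l2).getD k 0 = l1.getD k 0 := by
  simp [List.getD, List.getElem?_append_left h]

-- inner loop: pointwise pend update on the unprocessed tail, prefix untouched
lemma inner_aux (ps : List (Int × Int)) (k : Nat) (hsk : List (Int × Int × Int))
    (left size hv : Int) :
    ∀ (d a : Nat) (Pfx : List Int), ps.length = a + d → k < a → Pfx.length = a →
      Pfx.getD k 0 = hv →
      (PySem.List.pyRange (a : Int) (ps.length : Int) 1).foldl
          (aInner ps left (left + size) (k : Int))
          (Pfx ++ (List.range' a d).map (fun j => pend hsk (ps.getD j (0, 0)))) =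
      Pfx ++ (List.range' a d).map
          (fun j => pend (hsk ++ [(left, left + size, hv)]) (ps.getD j (0, 0))) := by
  intro d
  induction d with
  | zero =>
    intro a Pfx hlen hka hPfx hPk
    rw [PySem.List.pyRange_one_eq_nil (by exact_mod_cast (by omega : ps.length ≤ a))]
    simp
  | succ d ih =>
    intro a Pfx hlen hka hPfx hPk
    have haps : a < ps.length := by omega
    have hcast : ((a : Int) + 1) = ((a + 1 : Nat) : Int) := by push_cast; ring
    rw [PySem.List.pyRange_one_cons (by exact_mod_cast haps), List.range'_succ]
    simp only [List.map_cons, List.foldl_cons]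
    have hpendapp : ∀ j : Nat, pend (hsk ++ [(left, left + size, hv)]) (ps.getD j (0, 0))
        = bMax (ps.getD j (0, 0)).1 ((ps.getD j (0, 0)).1 + (ps.getD j (0, 0)).2)
            (pend hsk (ps.getD j (0, 0))) (left, left + size, hv) := by
      intro j; simp [pend, List.foldl_append]
    have hD_a : (Pfx ++ pend hsk (ps.getD a (0, 0)) ::
          (List.range' (a + 1) d).map (fun j => pend hsk (ps.getD j (0, 0)))).getD a 0
        = pend hsk (ps.getD a (0, 0)) := by
      have := getD_at_length Pfx (pend hsk (ps.getD a (0, 0)))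
        ((List.range' (a + 1) d).map (fun j => pend hsk (ps.getD j (0, 0))))
      rwa [hPfx] at this
    have hD_k : (Pfx ++ pend hsk (ps.getD a (0, 0)) ::
          (List.range' (a + 1) d).map (fun j => pend hsk (ps.getD j (0, 0)))).getD k 0
        = hv := by
      have hk' : k < Pfx.length := by omega
      rw [getD_append_lt _ _ _ hk', hPk]
    have hsetg : ∀ v : Int, (Pfx ++ pend hsk (ps.getD a (0, 0)) ::
          (List.range' (a + 1) d).map (fun j => pend hsk (ps.getD j (0, 0)))).set a v
        = Pfx ++ v :: (List.range' (a + 1) d).map (fun j => pend hsk (ps.getD j (0, 0))) := by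
      intro v
      have := set_at_length Pfx (pend hsk (ps.getD a (0, 0))) v
        ((List.range' (a + 1) d).map (fun j => pend hsk (ps.getD j (0, 0))))
      rwa [hPfx] at this
    have hstepeq : aInner ps left (left + size) (k : Int)
          (Pfx ++ pend hsk (ps.getD a (0, 0)) ::
            (List.range' (a + 1) d).map (fun j => pend hsk (ps.getD j (0, 0)))) (a : Int)
        = Pfx ++ pend (hsk ++ [(left, left + size, hv)]) (ps.getD a (0, 0)) ::
            (List.range' (a + 1) d).map (fun j => pend hsk (ps.getD j (0, 0))) := by
      simp only [aInner, PySem.List.pyGetD_natCast, PySem.List.pySetD_natCast]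
      by_cases hc : (ps.getD a (0, 0)).1 < left + size ∧
          left < (ps.getD a (0, 0)).1 + (ps.getD a (0, 0)).2
      · rw [if_pos hc, hD_a, hD_k, hsetg, hpendapp a]
        simp only [bMax]
        rw [if_pos ⟨hc.2, hc.1⟩]
      · rw [if_neg hc, hpendapp a]
        simp only [bMax]
        rw [if_neg (fun h => hc ⟨h.2, h.1⟩)]
    rw [hstepeq]
    have hassoc : Pfx ++ pend (hsk ++ [(left, left + size, hv)]) (ps.getD a (0, 0)) ::
          (List.range' (a + 1) d).map (fun j => pend hsk (ps.getD j (0, 0)))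
        = (Pfx ++ [pend (hsk ++ [(left, left + size, hv)]) (ps.getD a (0, 0))]) ++
          (List.range' (a + 1) d).map (fun j => pend hsk (ps.getD j (0, 0))) := by
      simp
    have hD_k2 : (Pfx ++ [pend (hsk ++ [(left, left + size, hv)]) (ps.getD a (0, 0))]).getD k 0
        = hv := by
      have hk' : k < Pfx.length := by omega
      rw [getD_append_lt _ _ _ hk', hPk]
    rw [hassoc, hcast,
        ih (a + 1) _ (by omega) (by omega) (by simp [hPfx]) hD_k2]
    simp

-- outer loop invariant: the first k slots hold the final heights, the rest hold
-- the running maximum pulled so far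
lemma outer_inv (ps : List (Int × Int)) (k : Nat) (hk : k ≤ ps.length) :
    ((PySem.List.enumerate ps 0).take k).foldl (aOuter ps) (List.replicate ps.length (0 : Int)) =
      ((hlist ps).take k).map (·.2.2) ++
        (List.range' k (ps.length - k)).map
          (fun j => pend ((hlist ps).take k) (ps.getD j (0, 0))) := by
  revert hk
  induction k with
  | zero =>
    intro _
    simp only [List.take_zero, List.foldl_nil, Nat.sub_zero, List.nil_append, List.map_nil]
    have hz : (fun j : Nat => pend ([] : List (Int × Int × Int)) (ps.getD j (0, 0)))
        = (fun _ : Nat => (0 : Int)) := rfl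
    rw [hz, List.map_const', List.length_range']
  | succ k ih =>
    intro hk
    have hklt : k < ps.length := hk
    have hPlen : (((hlist ps).take k).map (·.2.2)).length = k := by
      simp [length_hlist, Nat.min_eq_left (le_of_lt hklt)]
    have htk : (PySem.List.enumerate ps 0).take (k + 1)
        = (PySem.List.enumerate ps 0).take k ++ [((k : Int), ps[k])] := by
      rw [List.take_succ, enum_get ps 0 k, List.getElem?_eq_getElem hklt]
      simp
    have hd : ps.length - k = (ps.length - (k + 1)) + 1 := by omega
    have hgdk : ps.getD k ((0 : Int), (0 : Int)) = ps[k] := List.getD_eq_getElem ps (0, 0) hklt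
    have hchar : (hlist ps).take (k + 1) = (hlist ps).take k ++
        [(ps[k].1, ps[k].1 + ps[k].2, ps[k].2 + pend ((hlist ps).take k) ps[k])] := by
      rw [hlist_take ps (k + 1) hk, hlist_take ps k (le_of_lt hklt),
          show ps.take (k + 1) = ps.take k ++ [ps[k]] from by
            rw [List.take_succ, List.getElem?_eq_getElem hklt]; rfl,
          hlist, List.foldl_append, ← hlist]
      rfl
    rw [htk, List.foldl_append, ih (le_of_lt hklt), List.foldl_cons, List.foldl_nil]
    rw [hd, List.range'_succ, List.map_cons]
    simp only [aOuter]
    have hget_k : PySem.List.pyGetD (((hlist ps).take k).map (·.2.2) ++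
          pend ((hlist ps).take k) (ps.getD k (0, 0)) ::
          (List.range' (k + 1) (ps.length - (k + 1))).map
            (fun j => pend ((hlist ps).take k) (ps.getD j (0, 0)))) (k : Int) 0
        = pend ((hlist ps).take k) (ps.getD k (0, 0)) := by
      rw [PySem.List.pyGetD_natCast]
      have := getD_at_length (((hlist ps).take k).map (·.2.2))
        (pend ((hlist ps).take k) (ps.getD k (0, 0)))
        ((List.range' (k + 1) (ps.length - (k + 1))).map
          (fun j => pend ((hlist ps).take k) (ps.getD j (0, 0))))
      rwa [hPlen] at this
    rw [hget_k, PySem.List.pySetD_natCast]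
    have hset := set_at_length (((hlist ps).take k).map (·.2.2))
        (pend ((hlist ps).take k) (ps.getD k (0, 0)))
        (pend ((hlist ps).take k) (ps.getD k (0, 0)) + ps[k].2)
        ((List.range' (k + 1) (ps.length - (k + 1))).map
          (fun j => pend ((hlist ps).take k) (ps.getD j (0, 0))))
    rw [hPlen] at hset
    rw [hset]
    have hhv : pend ((hlist ps).take k) (ps.getD k (0, 0)) + ps[k].2
        = ps[k].2 + pend ((hlist ps).take k) ps[k] := by rw [hgdk, Int.add_comm]
    have hcast : ((k : Int) + 1) = ((k + 1 : Nat) : Int) := by push_cast; ring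
    rw [hhv, hcast]
    have hassoc : ((hlist ps).take k).map (·.2.2) ++
          (ps[k].2 + pend ((hlist ps).take k) ps[k]) ::
          (List.range' (k + 1) (ps.length - (k + 1))).map
            (fun j => pend ((hlist ps).take k) (ps.getD j (0, 0)))
        = (((hlist ps).take k).map (·.2.2) ++ [ps[k].2 + pend ((hlist ps).take k) ps[k]]) ++
          (List.range' (k + 1) (ps.length - (k + 1))).map
            (fun j => pend ((hlist ps).take k) (ps.getD j (0, 0))) := by
      simp
    have hD_k2 : ((((hlist ps).take k).map (·.2.2)) ++
          [ps[k].2 + pend ((hlist ps).take k) ps[k]]).getD k 0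
        = ps[k].2 + pend ((hlist ps).take k) ps[k] := by
      have := getD_at_length (((hlist ps).take k).map (·.2.2))
        (ps[k].2 + pend ((hlist ps).take k) ps[k]) []
      rw [hPlen] at this
      simpa using this
    rw [hassoc,
        inner_aux ps k ((hlist ps).take k) ps[k].1 ps[k].2
          (ps[k].2 + pend ((hlist ps).take k) ps[k])
          (ps.length - (k + 1)) (k + 1)
          _ (by omega) (by omega) (by simp [length_hlist]; omega) hD_k2]
    rw [hchar]
    simp

lemma qans_eq (ps : List (Int × Int)) :
    (PySem.List.enumerate ps 0).foldl (aOuter ps) (List.replicate ps.length (0 : Int)) =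
      (hlist ps).map (·.2.2) := by
  have h := outer_inv ps ps.length le_rfl
  have hlen : (PySem.List.enumerate ps 0).length = ps.length := by
    simp [PySem.List.length_enumerate]
  rw [List.take_of_length_le (le_of_eq hlen),
      List.take_of_length_le (le_of_eq (length_hlist ps))] at h
  simpa using h

-- ===== VERDICT (by name: the statement is the Claim_ definition above) =====
theorem fallingSquares1_spec : Claim_equal_fallingSquares1 := by
  intro ps _
  show fallingSquares1 ps = fallingSquares1_alt ps
  rw [fallingSquares1, alt_eq, qans_eq]
  rfl
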